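-- pv_equiv track=rewrite | github.com/eradityashewale/hospital-management-system | scripts/import_medicines_from_india_dataset.py | is_pediatric_medicine
-- ===== SOURCE A (Python) =====
-- def is_pediatric_medicine(name, pack_size, composition):
--     """Determine if medicine is pediatric based on name, pack size, and composition"""
--     name_lower = name.lower() if name else ''
--     pack_lower = pack_size.lower() if pack_size else ''
--     comp_lower = composition.lower() if composition else ''
--
--     # Check for pediatric indicators
--     pediatric_keywords = ['kid', 'child', 'pediatric', 'paediatric', 'infant', 'baby', 'drops', 'syrup']
--
--     for keyword in pediatric_keywords:
--         if keyword in name_lower or keyword in pack_lower or keyword in comp_lower: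
--             return 1
--
--     # Check if it's a syrup or drops (commonly pediatric)
--     if 'syrup' in pack_lower or 'drops' in pack_lower:
--         return 1
--
--     return 0
-- ===== SOURCE B (Python) =====
-- _KEYWORDS = ('kid', 'child', 'pediatric', 'paediatric', 'infant', 'baby', 'drops', 'syrup')
--
--
-- def is_pediatric_medicine(name, pack_size, composition):
--     """Determine if medicine is pediatric: one forward scan of the joined,
--     normalized text, testing all keywords at each position (automaton-style)."""
--     text = '\n'.join((x or '').lower() for x in (name, pack_size, composition))
--     for i in range(len(text)):
--         if any(text.startswith(k, i) for k in _KEYWORDS):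
--             return 1
--     return 0
-- ===== Notes on version B (the rewrite author's own statement) =====
-- stated objective: alternative
-- what changed: Replaces the keyword-major loop of substring searches over three strings with a single position-major forward scan of one '\n'-joined normalized text, testing the keyword set at each position; the dead trailing syrup/drops check is dropped since both words are already keywords.
import Mathlib
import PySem

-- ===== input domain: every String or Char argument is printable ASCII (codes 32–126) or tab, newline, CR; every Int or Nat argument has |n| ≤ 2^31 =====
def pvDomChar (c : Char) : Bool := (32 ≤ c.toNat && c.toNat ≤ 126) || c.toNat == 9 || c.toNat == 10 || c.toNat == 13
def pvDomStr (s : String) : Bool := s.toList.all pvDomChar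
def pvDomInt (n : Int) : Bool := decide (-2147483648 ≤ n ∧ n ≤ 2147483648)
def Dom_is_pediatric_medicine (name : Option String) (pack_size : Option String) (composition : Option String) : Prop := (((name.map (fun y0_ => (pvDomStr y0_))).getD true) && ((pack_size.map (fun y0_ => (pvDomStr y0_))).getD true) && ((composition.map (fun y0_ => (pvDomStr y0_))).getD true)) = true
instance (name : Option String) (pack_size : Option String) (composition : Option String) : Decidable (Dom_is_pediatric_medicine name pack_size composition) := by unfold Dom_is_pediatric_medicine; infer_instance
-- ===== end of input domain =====

-- B replaces A's keyword-major loop of substring searches over three strings by one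
-- position-major forward scan of a single '\n'-joined normalized text (alternative
-- decomposition); A's dead trailing syrup/drops check is dropped.

-- ===== PORT A =====
def pedKeywords : List String :=
  ["kid", "child", "pediatric", "paediatric", "infant", "baby", "drops", "syrup"]

-- 'x.lower() if x else '''  (None and '' are falsy)
def pyTruthyLower (x : Option String) : String :=
  match x with
  | some s => if s == "" then "" else PySem.Str.lower s
  | none => ""

-- the 'for keyword in pediatric_keywords' loop; the post-loop syrup/drops check
-- and the final 'return 0' are the base case
def pedLoop (name_lower pack_lower comp_lower : String) : List String → Int
  | [] =>
      if PySem.Str.isIn "syrup" pack_lower || PySem.Str.isIn "drops" pack_lower then 1 else 0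
  | keyword :: rest =>
      if PySem.Str.isIn keyword name_lower || PySem.Str.isIn keyword pack_lower ||
          PySem.Str.isIn keyword comp_lower then 1
      else pedLoop name_lower pack_lower comp_lower rest

def is_pediatric_medicine (name : Option String) (pack_size : Option String) (composition : Option String) : Int :=
  let name_lower := pyTruthyLower name
  let pack_lower := pyTruthyLower pack_size
  let comp_lower := pyTruthyLower composition
  pedLoop name_lower pack_lower comp_lower pedKeywords

-- ===== PORT B =====
def pedKeywordChars : List (List Char) :=
  ["kid".toList, "child".toList, "pediatric".toList, "paediatric".toList,
   "infant".toList, "baby".toList, "drops".toList, "syrup".toList]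

-- "(x or '').lower()"
def normLower (x : Option String) : List Char :=
  PySem.Chars.lower (x.getD "").toList

-- "for i in range(len(text)): if any(text.startswith(k, i) for k in _KEYWORDS): return 1"
-- as a forward scan over the suffixes of the text
def pedScan : List Char → Bool
  | [] => false
  | c :: rest =>
      if pedKeywordChars.any (fun k => PySem.Chars.startswith (c :: rest) k) then true
      else pedScan rest

def is_pediatric_medicine_alt (name : Option String) (pack_size : Option String) (composition : Option String) : Int :=
  let text := normLower name ++ '\n' :: (normLower pack_size ++ '\n' :: normLower composition)
  if pedScan text then 1 else 0

-- ===== PRECONDITION & SPEC =====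
def Spec_is_pediatric_medicine (name : Option String) (pack_size : Option String) (composition : Option String) (out : Int) : Prop := out = is_pediatric_medicine_alt name pack_size composition
instance (name : Option String) (pack_size : Option String) (composition : Option String) (out : Int) : Decidable (Spec_is_pediatric_medicine name pack_size composition out) := by unfold Spec_is_pediatric_medicine; infer_instance

-- ===== CLAIM (what is proved, stated in full; the proofs are below) =====
def Claim_equal_is_pediatric_medicine : Prop := ∀ (name : Option String) (pack_size : Option String) (composition : Option String), Dom_is_pediatric_medicine name pack_size composition → Spec_is_pediatric_medicine name pack_size composition (is_pediatric_medicine name pack_size composition)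

-- ===== LEMMAS AND PROOFS =====

-- normalization agrees: A's truthiness branch and B's (x or '').lower() give the same chars
theorem toList_pyTruthyLower (x : Option String) :
    (pyTruthyLower x).toList = normLower x := by
  match x with
  | none => rfl
  | some s =>
    simp only [pyTruthyLower, normLower, Option.getD_some]
    by_cases h : s = ""
    · subst h; rfl
    · simp [h]

-- a prefix of l ++ '\n' :: r that avoids '\n' is a prefix of l
theorem prefix_of_prefix_sep (k l r : List Char) (hn : '\n' ∉ k)
    (h : k <+: l ++ '\n' :: r) : k <+: l := by
  by_cases hlen : k.length ≤ l.length
  · rw [List.prefix_iff_eq_take] at h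
    rw [List.take_append_of_le_length hlen] at h
    exact List.prefix_iff_eq_take.mpr h
  · exfalso
    obtain ⟨t, ht⟩ := h
    apply hn
    have h1 : l.length < k.length := by omega
    have e1 : (k ++ t)[l.length]? = k[l.length]? := by
      rw [List.getElem?_append_left h1]
    have e2 : (l ++ '\n' :: r)[l.length]? = some '\n' := by
      rw [List.getElem?_append_right (le_refl _)]
      simp
    rw [ht, e2] at e1
    exact List.mem_of_getElem? e1.symm

-- a nonempty '\n'-free infix of l ++ '\n' :: r lies entirely inside l or inside r
theorem infix_sep (k l r : List Char) (hk : k ≠ []) (hn : '\n' ∉ k) :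
    k <:+: l ++ '\n' :: r ↔ k <:+: l ∨ k <:+: r := by
  constructor
  · induction l with
    | nil =>
      intro h
      rcases List.infix_cons_iff.mp h with hp | hi
      · exfalso
        match k, hk with
        | a :: k', _ =>
          obtain ⟨t, ht⟩ := hp
          simp only [List.cons_append, List.cons.injEq] at ht
          exact hn (ht.1 ▸ List.mem_cons_self)
      · exact Or.inr hi
    | cons x l' ih =>
      intro h
      rcases List.infix_cons_iff.mp h with hp | hi
      · exact Or.inl (prefix_of_prefix_sep k (x :: l') r hn (by simpa using hp)).isInfix
      · rcases ih hi with h1 | h2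
        · exact Or.inl (List.infix_cons h1)
        · exact Or.inr h2
  · rintro (h | h)
    · exact List.infix_append_of_infix_left h
    · exact List.infix_append_of_infix_right (List.infix_cons h)

-- every keyword is nonempty and '\n'-free
theorem pedKeywordChars_ok : ∀ k ∈ pedKeywordChars, k ≠ [] ∧ '\n' ∉ k := by decide

-- the scan finds exactly the texts containing some keyword
theorem pedScan_iff (s : List Char) :
    pedScan s = true ↔ ∃ k ∈ pedKeywordChars, k <:+: s := by
  induction s with
  | nil =>
    simp only [pedScan]
    constructor
    · intro h; exact absurd h (by decide)
    · rintro ⟨k, hk, hinf⟩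
      exact absurd (List.eq_nil_of_infix_nil hinf) (pedKeywordChars_ok k hk).1
  | cons c rest ih =>
    simp only [pedScan]
    split_ifs with h
    · simp only [true_iff]
      rw [List.any_eq_true] at h
      obtain ⟨k, hk, hsw⟩ := h
      exact ⟨k, hk, ((PySem.Chars.startswith_iff _ _).mp hsw).isInfix⟩
    · rw [ih]
      rw [Bool.not_eq_true, List.any_eq_false] at h
      constructor
      · rintro ⟨k, hk, hinf⟩; exact ⟨k, hk, List.infix_cons hinf⟩
      · rintro ⟨k, hk, hinf⟩
        rcases List.infix_cons_iff.mp hinf with hp | hi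
        · exact absurd ((PySem.Chars.startswith_iff _ _).mpr hp) (by simpa using h k hk)
        · exact ⟨k, hk, hi⟩

-- the scan of the joined text = some keyword occurs in one of the three parts
theorem pedScan_join (nl pl cl : List Char) :
    pedScan (nl ++ '\n' :: (pl ++ '\n' :: cl)) =
      pedKeywordChars.any (fun k =>
        PySem.Chars.isIn k nl || PySem.Chars.isIn k pl || PySem.Chars.isIn k cl) := by
  rw [Bool.eq_iff_iff, pedScan_iff, List.any_eq_true]
  constructor
  · rintro ⟨k, hk, hinf⟩
    obtain ⟨hne, hnn⟩ := pedKeywordChars_ok k hk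
    rw [infix_sep k _ _ hne hnn] at hinf
    rcases hinf with h1 | h23
    · exact ⟨k, hk, by simp [PySem.Chars.isIn_iff_infix, h1]⟩
    · rw [infix_sep k _ _ hne hnn] at h23
      rcases h23 with h2 | h3
      · exact ⟨k, hk, by simp [PySem.Chars.isIn_iff_infix, h2]⟩
      · exact ⟨k, hk, by simp [PySem.Chars.isIn_iff_infix, h3]⟩
  · rintro ⟨k, hk, hcond⟩
    obtain ⟨hne, hnn⟩ := pedKeywordChars_ok k hk
    refine ⟨k, hk, ?_⟩
    rw [infix_sep k _ _ hne hnn, infix_sep k _ _ hne hnn]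
    simp only [Bool.or_eq_true, PySem.Chars.isIn_iff_infix] at hcond
    tauto

-- A's loop, closed form: 1 iff some keyword occurs (plus the trailing syrup/drops check)
theorem pedLoop_eq (nl pl cl : String) (ks : List String) :
    pedLoop nl pl cl ks =
      if (ks.any (fun k => PySem.Str.isIn k nl || PySem.Str.isIn k pl || PySem.Str.isIn k cl)
          || PySem.Str.isIn "syrup" pl || PySem.Str.isIn "drops" pl) then 1 else 0 := by
  induction ks with
  | nil => simp [pedLoop]
  | cons k rest ih =>
    simp only [pedLoop, List.any_cons, ih, Bool.or_eq_true]
    split_ifs <;> first | rfl | tauto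

-- a disjunct already implied by c is absorbed
theorem bool_or_absorb (c s d : Bool) (h1 : s = true → c = true) (h2 : d = true → c = true) :
    (c || s || d) = c := by
  cases s
  · cases d
    · simp
    · simp [h2 rfl]
  · simp [h1 rfl]

-- ===== VERDICT (by name: the statement is the Claim_ definition above) =====
set_option maxHeartbeats 1000000 in
theorem is_pediatric_medicine_spec : Claim_equal_is_pediatric_medicine := by
  intro name pack_size composition _
  unfold Spec_is_pediatric_medicine is_pediatric_medicine is_pediatric_medicine_alt
  simp only [pedLoop_eq, pedScan_join]
  have hb : ∀ (x : Option String) (k : String),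
      PySem.Str.isIn k (pyTruthyLower x) = PySem.Chars.isIn k.toList (normLower x) := by
    intro x k
    rw [← toList_pyTruthyLower]
    simp [PySem.Str.isIn]
  have hC : (pedKeywordChars.any fun k =>
        PySem.Chars.isIn k (normLower name) || PySem.Chars.isIn k (normLower pack_size) ||
          PySem.Chars.isIn k (normLower composition))
      = pedKeywords.any fun k =>
        PySem.Str.isIn k (pyTruthyLower name) || PySem.Str.isIn k (pyTruthyLower pack_size) ||
          PySem.Str.isIn k (pyTruthyLower composition) := by
    rw [show pedKeywordChars = pedKeywords.map String.toList from rfl, List.any_map]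
    congr 1
    funext k
    simp [Function.comp, toList_pyTruthyLower]
  simp only [hC]
  have hs : PySem.Str.isIn "syrup" (pyTruthyLower pack_size) = true →
      (pedKeywords.any fun k =>
        PySem.Str.isIn k (pyTruthyLower name) || PySem.Str.isIn k (pyTruthyLower pack_size) ||
          PySem.Str.isIn k (pyTruthyLower composition)) = true := by
    intro h
    exact List.any_eq_true.mpr ⟨"syrup", by simp [pedKeywords], by rw [h]; simp⟩
  have hd : PySem.Str.isIn "drops" (pyTruthyLower pack_size) = true →
      (pedKeywords.any fun k =>
        PySem.Str.isIn k (pyTruthyLower name) || PySem.Str.isIn k (pyTruthyLower pack_size) ||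
          PySem.Str.isIn k (pyTruthyLower composition)) = true := by
    intro h
    exact List.any_eq_true.mpr ⟨"drops", by simp [pedKeywords], by rw [h]; simp⟩
  simp only [bool_or_absorb _ _ _ hs hd]
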